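-- pv_equiv track=rewrite | github.com/mladmon/CtCI | 01-arrays_strings/1.3-urlify.py | non_pythonic_urlify
-- ===== SOURCE A (Python) =====
-- def non_pythonic_urlify(string, true_length):
-- 	char_list = list(string)
-- 	num_spaces = 0
-- 	for i in range(true_length):
-- 		if char_list[i] == ' ':
-- 			num_spaces += 1
--
-- 	copy_to_index = true_length + num_spaces*2 - 1
-- 	for i in reversed(range(true_length)):
-- 		if char_list[i] == ' ':
-- 			char_list[copy_to_index] = '0'
-- 			char_list[copy_to_index - 1] = '2'
-- 			char_list[copy_to_index - 2] = '%'
-- 			copy_to_index -= 3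
-- 		else:
-- 			char_list[copy_to_index] = char_list[i]
-- 			copy_to_index -= 1
--
-- 	return ''.join(char_list)
-- ===== SOURCE B (Python) =====
-- def non_pythonic_urlify(string, true_length):
--     urlified = ''.join('%20' if string[i] == ' ' else string[i] for i in range(true_length))
--     return urlified + string[len(urlified):]
-- ===== Notes on version B (the rewrite author's own statement) =====
-- stated objective: simpler
-- what changed: A counts spaces then copies the buffer back-to-front in place with a moving write index; B builds the result front-to-back in one forward pass (urlified prefix) and appends the untouched tail slice string[len(urlified):], with no in-place writes or write-index arithmetic.
import Mathlib
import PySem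

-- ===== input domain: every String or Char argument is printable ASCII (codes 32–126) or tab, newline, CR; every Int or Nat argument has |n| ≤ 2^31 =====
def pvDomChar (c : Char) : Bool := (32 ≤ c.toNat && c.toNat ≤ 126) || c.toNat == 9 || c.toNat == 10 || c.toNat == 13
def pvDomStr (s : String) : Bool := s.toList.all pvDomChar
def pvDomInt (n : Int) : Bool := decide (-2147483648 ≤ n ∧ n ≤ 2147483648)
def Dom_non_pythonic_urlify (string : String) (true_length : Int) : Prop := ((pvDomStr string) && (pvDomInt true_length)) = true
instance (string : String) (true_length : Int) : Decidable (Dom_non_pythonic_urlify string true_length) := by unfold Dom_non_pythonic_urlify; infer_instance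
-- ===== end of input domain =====

-- B replaces A's count-then-copy-backwards buffer rewrite by a forward build: urlified prefix ++ untouched tail slice (simpler).


-- ===== PORT A =====
-- loop body of A's backward copy loop: state = (char_list, copy_to_index)
def pvStepA (st : List Char × Int) (i : Int) : List Char × Int :=
  if PySem.List.pyGetD st.1 i '?' == ' ' then
    (PySem.List.pySetD (PySem.List.pySetD (PySem.List.pySetD st.1 st.2 '0') (st.2 - 1) '2') (st.2 - 2) '%',
     st.2 - 3)
  else
    (PySem.List.pySetD st.1 st.2 (PySem.List.pyGetD st.1 i '?'), st.2 - 1)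

def non_pythonic_urlify (string : String) (true_length : Int) : String :=
  let char_list := string.toList
  let num_spaces : Int :=
    (PySem.List.pyRange 0 true_length 1).foldl
      (fun acc i => if PySem.List.pyGetD char_list i '?' == ' ' then acc + 1 else acc) 0
  let final :=
    (PySem.List.pyRange 0 true_length 1).reverse.foldl pvStepA
      (char_list, true_length + num_spaces * 2 - 1)
  String.ofList final.1

-- ===== PORT B =====
def non_pythonic_urlify_alt (string : String) (true_length : Int) : String :=
  let urlified := (PySem.List.pyRange 0 true_length 1).flatMap
    (fun i => if PySem.List.pyGetD string.toList i '?' == ' ' then ['%', '2', '0']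
              else [PySem.List.pyGetD string.toList i '?'])
  String.ofList (urlified ++ PySem.List.slice string.toList (some (urlified.length : Int)) none)

-- ===== PRECONDITION & SPEC =====
-- Pre_ excludes exactly the inputs on which A raises IndexError: true_length > len(string) (the counting
-- loop reads past the buffer) or true_length + 2*spaces-in-prefix > len(string) (the backward copy writes past it).
def Pre_non_pythonic_urlify (string : String) (true_length : Int) : Prop :=
  true_length ≤ (string.toList.length : Int) ∧
    true_length + 2 * (((string.toList.take true_length.toNat).count ' ' : Nat) : Int) ≤ (string.toList.length : Int)
instance (string : String) (true_length : Int) : Decidable (Pre_non_pythonic_urlify string true_length) := by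
  unfold Pre_non_pythonic_urlify; infer_instance

def pvWitness_non_pythonic_urlify : String × Int := ("Mr John Smith    ", 13)

def Spec_non_pythonic_urlify (string : String) (true_length : Int) (out : String) : Prop := out = non_pythonic_urlify_alt string true_length
instance (string : String) (true_length : Int) (out : String) : Decidable (Spec_non_pythonic_urlify string true_length out) := by unfold Spec_non_pythonic_urlify; infer_instance

-- ===== CLAIM (what is proved, stated in full; the proofs are below) =====
def Claim_equal_non_pythonic_urlify : Prop := ∀ (string : String) (true_length : Int), Dom_non_pythonic_urlify string true_length → Pre_non_pythonic_urlify string true_length → Spec_non_pythonic_urlify string true_length (non_pythonic_urlify string true_length)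

-- ===== LEMMAS AND PROOFS =====

-- the '%20' expansion of a character list (proof-side name for B's flatMap)
def pvExpand (xs : List Char) : List Char := xs.flatMap (fun c => if c == ' ' then ['%', '2', '0'] else [c])

lemma pvExpand_cons (a : Char) (xs : List Char) :
    pvExpand (a :: xs) = (if a == ' ' then ['%', '2', '0'] else [a]) ++ pvExpand xs := rfl

lemma pvExpand_length (xs : List Char) :
    (pvExpand xs).length = xs.length + 2 * xs.count ' ' := by
  induction xs with
  | nil => rfl
  | cons a t ih =>
    rw [pvExpand_cons]
    by_cases h : a = ' ' <;> simp [h, ih] <;> omega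

lemma pv_set_last (X R : List Char) (m : Nat) (v : Char) (h : X.length = m + 1) :
    (X ++ R).set m v = X.take m ++ v :: R := by
  rw [List.set_append_left _ _ (by omega)]
  rw [List.set_eq_take_append_cons_drop]
  simp [h]


lemma pv_count (l : List Char) (n : Nat) (hn : n ≤ l.length) :
    (PySem.List.pyRange 0 (n : Int) 1).foldl
        (fun acc i => if PySem.List.pyGetD l i '?' == ' ' then acc + 1 else acc) (0 : Int)
      = (((l.take n).count ' ' : Nat) : Int) := by
  induction n with
  | zero => simp
  | succ n ih =>
    rw [show ((n + 1 : Nat) : Int) = (n : Int) + 1 by push_cast; ring,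
        PySem.List.pyRange_one_succ_right (Int.natCast_nonneg n), List.foldl_append]
    simp only [List.foldl_cons, List.foldl_nil]
    rw [ih (by omega)]
    have hlt : n < l.length := by omega
    rw [PySem.List.pyGetD_eq_getElem _ _ (Int.natCast_nonneg n) (by exact_mod_cast hlt)]
    have hsucc : l.take (n + 1) = l.take n ++ [l[n]] := by
      rw [List.take_add_one]; simp [List.getElem?_eq_getElem hlt]
    rw [hsucc, List.count_append]
    by_cases h : l[n] = ' ' <;> simp [h]

lemma pv_expand_range (l : List Char) (n : Nat) (hn : n ≤ l.length) :
    (PySem.List.pyRange 0 (n : Int) 1).flatMap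
        (fun i => if PySem.List.pyGetD l i '?' == ' ' then ['%', '2', '0']
                  else [PySem.List.pyGetD l i '?'])
      = pvExpand (l.take n) := by
  induction n with
  | zero => simp [pvExpand]
  | succ n ih =>
    rw [show ((n + 1 : Nat) : Int) = (n : Int) + 1 by push_cast; ring,
        PySem.List.pyRange_one_succ_right (Int.natCast_nonneg n), List.flatMap_append]
    have hlt : n < l.length := by omega
    rw [ih (by omega)]
    simp only [List.flatMap_cons, List.flatMap_nil, List.append_nil]
    rw [PySem.List.pyGetD_eq_getElem _ _ (Int.natCast_nonneg n) (by exact_mod_cast hlt)]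
    have hsucc : l.take (n + 1) = l.take n ++ [l[n]] := by
      rw [List.take_add_one]; simp [List.getElem?_eq_getElem hlt]
    rw [hsucc]
    unfold pvExpand
    rw [List.flatMap_append]
    simp

lemma pv_loop (l : List Char) (n : Nat) (hn : n ≤ l.length)
    (hnl : n + 2 * (l.take n).count ' ' ≤ l.length) :
    ∀ i : Nat, i ≤ n →
      ((PySem.List.pyRange 0 (i : Int) 1).reverse.foldl pvStepA
          (l.take (i + 2 * (l.take i).count ' ') ++ pvExpand ((l.drop i).take (n - i)) ++
             l.drop (n + 2 * (l.take n).count ' '),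
           (i : Int) + 2 * (((l.take i).count ' ' : Nat) : Int) - 1)).1
        = pvExpand (l.take n) ++ l.drop (n + 2 * (l.take n).count ' ') := by
  intro i
  induction i with
  | zero => simp
  | succ i ih =>
    intro hin
    have hlt : i < l.length := by omega
    have hsucc : l.take (i + 1) = l.take i ++ [l[i]] := by
      rw [List.take_add_one]; simp [List.getElem?_eq_getElem hlt]
    have hs1 : (l.take (i + 1)).count ' ' = (l.take i).count ' ' + (if l[i] = ' ' then 1 else 0) := by
      rw [hsucc, List.count_append]
      by_cases h : l[i] = ' ' <;> simp [h]
    have hsplit : (l.take n).count ' '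
        = (l.take (i + 1)).count ' ' + ((l.drop (i + 1)).take (n - (i + 1))).count ' ' := by
      conv_lhs => rw [show n = (i + 1) + (n - (i + 1)) by omega]
      rw [List.take_add, List.count_append]
    have hsub : (l.take (i + 1)).Sublist (l.take n) := by
      rw [show l.take (i + 1) = (l.take n).take (i + 1) by
            rw [List.take_take]; congr 1; omega]
      exact List.take_sublist _ _
    have hcle := hsub.count_le ' '
    have hK : (i + 1) + 2 * (l.take (i + 1)).count ' ' ≤ n + 2 * (l.take n).count ' ' := by omega
    -- peel the last range element (index i) off the reversed range
    rw [show ((i + 1 : Nat) : Int) = (i : Int) + 1 by push_cast; ring,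
        PySem.List.pyRange_one_succ_right (Int.natCast_nonneg i), List.reverse_append]
    simp only [List.reverse_singleton, List.singleton_append, List.foldl_cons]
    -- names
    set K := (i + 1) + 2 * (l.take (i + 1)).count ' ' with hKdef
    set nl := n + 2 * (l.take n).count ' ' with hnldef
    have hKlen : (l.take K).length = K := by simp; omega
    have hbuf : (l.take K ++ pvExpand ((l.drop (i + 1)).take (n - (i + 1))) ++ l.drop nl).length = l.length := by
      simp [pvExpand_length]
      omega
    have hgeti : PySem.List.pyGetD (l.take K ++ pvExpand ((l.drop (i + 1)).take (n - (i + 1))) ++ l.drop nl) (i : Int) '?' = l[i] := by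
      rw [PySem.List.pyGetD_natCast, List.append_assoc, List.getD_eq_getElem?_getD,
          List.getElem?_append_left (by simp; omega)]
      simp [show i < K by omega, List.getElem?_eq_getElem hlt]
    have hseg : (l.drop i).take (n - i) = l[i] :: (l.drop (i + 1)).take (n - (i + 1)) := by
      rw [List.drop_eq_getElem_cons hlt, show n - i = (n - (i + 1)) + 1 by omega]
      rfl
    have hcti : ((i : Int) + 1) + 2 * (((l.take (i + 1)).count ' ' : Nat) : Int) - 1 = ((K : Nat) : Int) - 1 := by
      push_cast [hKdef]; ring
    by_cases h : l[i] = ' '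
    · -- space case
      have hs1' : (l.take (i + 1)).count ' ' = (l.take i).count ' ' + 1 := by simp [h] at hs1; omega
      set m := i + 2 * (l.take i).count ' ' with hmdef
      have hKm : K = m + 3 := by omega
      have hstep : pvStepA
          (l.take K ++ pvExpand ((l.drop (i + 1)).take (n - (i + 1))) ++ l.drop nl,
           ((i : Int) + 1) + 2 * (((l.take (i + 1)).count ' ' : Nat) : Int) - 1) i
          = (l.take m ++ pvExpand ((l.drop i).take (n - i)) ++ l.drop nl,
             (i : Int) + 2 * (((l.take i).count ' ' : Nat) : Int) - 1) := by
        unfold pvStepA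
        simp only [hgeti, h, BEq.rfl, if_true, hcti]
        rw [show ((K : Nat) : Int) - 1 = ((m + 2 : Nat) : Int) by push_cast; omega,
            show ((m + 2 : Nat) : Int) - 1 = ((m + 1 : Nat) : Int) by omega,
            show ((m + 2 : Nat) : Int) - 2 = ((m : Nat) : Int) by omega]
        simp only [PySem.List.pySetD_natCast]
        rw [List.append_assoc, pv_set_last _ _ (m + 2) _ (by omega)]
        rw [List.take_take, show min (m + 2) K = m + 2 by omega]
        rw [pv_set_last _ _ (m + 1) _ (by simp; omega)]
        rw [List.take_take, show min (m + 1) (m + 2) = m + 1 by omega]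
        rw [pv_set_last _ _ m _ (by simp; omega)]
        rw [List.take_take, show min m (m + 1) = m by omega]
        simp only [Prod.mk.injEq]
        constructor
        · rw [hseg, pvExpand_cons]
          simp [h, List.append_assoc]
        · omega
      rw [hstep]
      exact ih (by omega)
    · -- non-space case
      have hs1' : (l.take (i + 1)).count ' ' = (l.take i).count ' ' := by simp [h] at hs1; omega
      set m := i + 2 * (l.take i).count ' ' with hmdef
      have hKm : K = m + 1 := by omega
      have hstep : pvStepA
          (l.take K ++ pvExpand ((l.drop (i + 1)).take (n - (i + 1))) ++ l.drop nl,
           ((i : Int) + 1) + 2 * (((l.take (i + 1)).count ' ' : Nat) : Int) - 1) i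
          = (l.take m ++ pvExpand ((l.drop i).take (n - i)) ++ l.drop nl,
             (i : Int) + 2 * (((l.take i).count ' ' : Nat) : Int) - 1) := by
        unfold pvStepA
        simp only [hgeti, h, beq_iff_eq, if_false, hcti]
        rw [show ((K : Nat) : Int) - 1 = ((m : Nat) : Int) by omega]
        simp only [PySem.List.pySetD_natCast]
        rw [List.append_assoc, pv_set_last _ _ m _ (by simp; omega)]
        rw [List.take_take, show min m K = m by omega]
        simp only [Prod.mk.injEq]
        constructor
        · rw [hseg, pvExpand_cons]
          simp [h, List.append_assoc]
        · push_cast; omega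
      rw [hstep]
      exact ih (by omega)


-- ===== VERDICT (by name: the statement is the Claim_ definition above) =====
theorem non_pythonic_urlify_spec : Claim_equal_non_pythonic_urlify := by
  intro s tl _ hpre
  obtain ⟨h1, h2⟩ := hpre
  unfold Spec_non_pythonic_urlify non_pythonic_urlify non_pythonic_urlify_alt
  dsimp only
  by_cases hneg : tl < 0
  · rw [PySem.List.pyRange_one_eq_nil (by omega : tl ≤ 0)]
    simp only [List.flatMap_nil, List.length_nil, Nat.cast_zero, List.reverse_nil,
      List.foldl_nil, List.nil_append]
    rw [PySem.List.slice_from _ (le_refl (0 : Int))]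
    rfl
  · set l := s.toList with hldef
    set n := tl.toNat with hndef
    have htl : tl = (n : Int) := by omega
    have hn : n ≤ l.length := by omega
    have hnl : n + 2 * (l.take n).count ' ' ≤ l.length := by omega
    rw [htl, pv_count l n hn, pv_expand_range l n hn]
    have hA := pv_loop l n hn hnl n le_rfl
    rw [show l.take (n + 2 * (l.take n).count ' ') ++ pvExpand ((l.drop n).take (n - n)) ++
          l.drop (n + 2 * (l.take n).count ' ') = l from by simp [pvExpand]] at hA
    rw [show (n : Int) + (((l.take n).count ' ' : Nat) : Int) * 2 - 1
          = (n : Int) + 2 * (((l.take n).count ' ' : Nat) : Int) - 1 from by ring, hA]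
    rw [pvExpand_length, show (l.take n).length = n from by simp; omega]
    rw [PySem.List.slice_from _ (Int.natCast_nonneg (n + 2 * (l.take n).count ' '))]
    rw [Int.toNat_natCast]
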